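-- pv_equiv track=rewrite | github.com/giunzz/PYTHON_UTE | TT/Chuong11/Chuong11_Hoang Ngoc Dung/Chuong11/bai11.py | is_encoded_version
-- ===== SOURCE A (Python) =====
-- def is_encoded_version(original, encoded):
--     if len(original) != len(encoded):
--         return False
--
--     substitution_dict = {}
--
--     for char1, char2 in zip(original, encoded):
--         if char1 == char2:
--             return False
--         if char1 not in substitution_dict:
--             substitution_dict[char1] = char2
--         elif substitution_dict[char1] != char2:
--             return False
--
--     return len(set(substitution_dict.values())) == len(substitution_dict.values())
-- ===== SOURCE B (Python) =====
-- def is_encoded_version(original, encoded):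
--     if len(original) != len(encoded):
--         return False
--     forward = {}
--     reverse = {}
--     for c1, c2 in zip(original, encoded):
--         if c1 == c2:
--             return False
--         if c1 in forward:
--             if forward[c1] != c2:
--                 return False
--         elif c2 in reverse:
--             return False
--         else:
--             forward[c1] = c2
--             reverse[c2] = c1
--     return True
-- ===== Notes on version B (the rewrite author's own statement) =====
-- stated objective: alternative
-- what changed: B maintains a second reverse dict (enc->orig) checked incrementally inside the single pass, so injectivity is enforced as pairs arrive and A's separate final len(set(values))==len(values) uniqueness pass disappears.
import Mathlib
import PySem

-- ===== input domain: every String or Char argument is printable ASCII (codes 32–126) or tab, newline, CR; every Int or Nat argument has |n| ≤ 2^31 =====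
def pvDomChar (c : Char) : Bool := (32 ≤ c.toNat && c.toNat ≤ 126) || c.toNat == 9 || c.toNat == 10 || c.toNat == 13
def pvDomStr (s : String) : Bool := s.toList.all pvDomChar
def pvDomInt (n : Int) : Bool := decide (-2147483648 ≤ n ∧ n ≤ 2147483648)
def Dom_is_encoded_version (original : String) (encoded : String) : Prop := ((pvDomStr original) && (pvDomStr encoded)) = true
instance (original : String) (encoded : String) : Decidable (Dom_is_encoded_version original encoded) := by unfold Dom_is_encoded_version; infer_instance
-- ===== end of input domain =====

-- B replaces A's final len(set(values)) uniqueness pass by a reverse dict checked incrementally inside the same single pass (alternative decomposition, same cost).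

-- ===== PORT A =====
-- A's loop over zip(original, encoded) building substitution_dict; none = early 'return False'
def pvLoopA : List (Char × Char) → PySem.Dict Char Char → Option (PySem.Dict Char Char)
  | [], d => some d
  | (c1, c2) :: rest, d =>
    if c1 == c2 then none
    else if !(d.contains c1) then pvLoopA rest (d.insert c1 c2)
    else if d.getD c1 c2 != c2 then none
    else pvLoopA rest d

def is_encoded_version (original : String) (encoded : String) : Bool :=
  if PySem.Str.len original ≠ PySem.Str.len encoded then false
  else
    match pvLoopA (original.toList.zip encoded.toList) PySem.Dict.empty with
    | none => false
    | some d => PySem.Set.len (PySem.Set.ofList d.values) == (d.values.length : Int)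

-- ===== PORT B =====
-- B's loop: forward and reverse dicts, injectivity enforced incrementally
def pvLoopB : List (Char × Char) → PySem.Dict Char Char → PySem.Dict Char Char → Bool
  | [], _, _ => true
  | (c1, c2) :: rest, f, r =>
    if c1 == c2 then false
    else if f.contains c1 then
      if f.getD c1 c2 != c2 then false else pvLoopB rest f r
    else if r.contains c2 then false
    else pvLoopB rest (f.insert c1 c2) (r.insert c2 c1)

def is_encoded_version_alt (original : String) (encoded : String) : Bool :=
  if PySem.Str.len original ≠ PySem.Str.len encoded then false
  else pvLoopB (original.toList.zip encoded.toList) PySem.Dict.empty PySem.Dict.empty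

-- ===== PRECONDITION & SPEC =====
def Spec_is_encoded_version (original : String) (encoded : String) (out : Bool) : Prop := out = is_encoded_version_alt original encoded
instance (original : String) (encoded : String) (out : Bool) : Decidable (Spec_is_encoded_version original encoded out) := by unfold Spec_is_encoded_version; infer_instance

-- ===== CLAIM (what is proved, stated in full; the proofs are below) =====
def Claim_equal_is_encoded_version : Prop := ∀ (original : String) (encoded : String), Dom_is_encoded_version original encoded → Spec_is_encoded_version original encoded (is_encoded_version original encoded)

-- ===== LEMMAS AND PROOFS =====

-- invariant: forward and reverse dicts are mutually inverse, with unique keys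
def pvInv (f r : PySem.Dict Char Char) : Prop :=
  f.keys.Nodup ∧ r.keys.Nodup ∧ ∀ k v, f.get? k = some v ↔ r.get? v = some k

theorem pvLoopA_mono (ps : List (Char × Char)) (d d' : PySem.Dict Char Char)
    (h : pvLoopA ps d = some d') (k v : Char) (hk : d.get? k = some v) :
    d'.get? k = some v := by
  induction ps generalizing d with
  | nil => simp [pvLoopA] at h; subst h; exact hk
  | cons p rest ih =>
    obtain ⟨c1, c2⟩ := p
    simp only [pvLoopA] at h
    split at h
    · exact absurd h (by simp)
    · split at h
      · rename_i hc
        apply ih _ h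
        rw [PySem.Dict.get?_insert_of_ne]
        · exact hk
        · rintro rfl
          rw [PySem.Dict.contains_eq_isSome_get?, hk] at hc; simp at hc
      · split at h
        · exact absurd h (by simp)
        · exact ih _ h hk

theorem pvOfList_sublist {α : Type} [BEq α] [LawfulBEq α] (xs : List α) :
    (PySem.Set.ofList xs).Sublist xs := by
  induction xs with
  | nil => simp [PySem.Set.ofList_nil]
  | cons x xs ih =>
    rw [PySem.Set.ofList_cons]
    apply List.Sublist.cons₂
    refine List.Sublist.trans ?_ ih
    simp only [PySem.Set.discard]
    exact List.filter_sublist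

theorem pvNodup_iff_len {α : Type} [BEq α] [LawfulBEq α] (xs : List α) :
    xs.Nodup ↔ (PySem.Set.ofList xs).length = xs.length := by
  constructor
  · intro h; rw [PySem.Set.ofList_eq_self_of_nodup xs h]
  · intro h
    have := (pvOfList_sublist xs).eq_of_length h
    rw [← this]; exact PySem.Set.nodup_ofList xs

-- duplicate value at two distinct keys ⇒ values not Nodup
theorem pvValues_dup (d : PySem.Dict Char Char)
    (k1 k2 v : Char) (hne : k1 ≠ k2) (h1 : d.get? k1 = some v) (h2 : d.get? k2 = some v) :
    ¬ d.values.Nodup := by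
  intro hv
  have m1 := PySem.Dict.mem_items_of_get?_eq_some d h1
  have m2 := PySem.Dict.mem_items_of_get?_eq_some d h2
  simp only [PySem.Dict.values] at hv
  have := List.inj_on_of_nodup_map hv m1 m2 rfl
  exact hne (congrArg Prod.fst this)

-- mutually inverse dict ⇒ values Nodup
theorem pvValues_nodup (f r : PySem.Dict Char Char) (hinv : pvInv f r) :
    f.values.Nodup := by
  obtain ⟨hf, hr, hiff⟩ := hinv
  simp only [PySem.Dict.values]
  apply List.Nodup.map_on
  · intro p hp q hq hpq
    have g1 := PySem.Dict.get?_of_mem_items f (by exact hp) hf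
    have g2 := PySem.Dict.get?_of_mem_items f (by exact hq) hf
    have r1 := (hiff p.1 p.2).mp g1
    have r2 := (hiff q.1 q.2).mp g2
    rw [hpq] at r1
    have : p.1 = q.1 := by rw [r1] at r2; exact Option.some_injective _ r2
    exact Prod.ext this hpq
  · exact hf.of_map _

theorem pvMain (ps : List (Char × Char)) (f r : PySem.Dict Char Char) (hinv : pvInv f r) :
    (match pvLoopA ps f with
      | none => false
      | some d => (PySem.Set.len (PySem.Set.ofList d.values) == (d.values.length : Int)))
      = pvLoopB ps f r := by
  induction ps generalizing f r with
  | nil =>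
    simp only [pvLoopA, pvLoopB]
    have hv := (pvNodup_iff_len f.values).mp (pvValues_nodup f r hinv)
    simp [PySem.Set.len, hv]
  | cons p rest ih =>
    obtain ⟨c1, c2⟩ := p
    simp only [pvLoopA, pvLoopB]
    by_cases h12 : c1 == c2
    · simp [h12]
    · simp only [h12, if_false, Bool.false_eq_true]
      by_cases hc : f.contains c1
      · simp only [hc, Bool.not_true, if_false, if_true, Bool.false_eq_true]
        by_cases hg : f.getD c1 c2 != c2
        · simp [hg]
        · simp only [hg, if_false, Bool.false_eq_true]
          exact ih f r hinv
      · have hf1 : f.get? c1 = none := by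
          rw [PySem.Dict.contains_eq_isSome_get?] at hc
          exact Option.not_isSome_iff_eq_none.mp (by simpa using hc)
        simp only [hc, Bool.not_false, if_true, Bool.false_eq_true]
        by_cases hrc : r.contains c2
        · -- injectivity violated now: A's final uniqueness check fails later
          simp only [hrc, if_true]
          obtain ⟨k, hk⟩ : ∃ k, r.get? c2 = some k := by
            rw [PySem.Dict.contains_eq_isSome_get?] at hrc
            exact Option.isSome_iff_exists.mp hrc
          have hfk : f.get? k = some c2 := (hinv.2.2 k c2).mpr hk
          have hkne : k ≠ c1 := by rintro rfl; rw [hf1] at hfk; simp at hfk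
          cases hA : pvLoopA rest (f.insert c1 c2) with
          | none => rfl
          | some d =>
            have g1 : d.get? c1 = some c2 :=
              pvLoopA_mono rest _ d hA c1 c2 (PySem.Dict.get?_insert_self f c1 c2)
            have g2 : d.get? k = some c2 :=
              pvLoopA_mono rest _ d hA k c2 (by rw [PySem.Dict.get?_insert_of_ne f c2 hkne]; exact hfk)
            have hnd := pvValues_dup d c1 k c2 (Ne.symm hkne) g1 g2
            have hlen : (PySem.Set.ofList d.values).length ≠ d.values.length := by
              intro h; exact hnd ((pvNodup_iff_len d.values).mpr h)
            simp only [PySem.Set.len]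
            simpa using hlen
        · simp only [hrc, if_false, Bool.false_eq_true]
          apply ih
          obtain ⟨hfn, hrn, hiff⟩ := hinv
          have hr2 : r.get? c2 = none := by
            rw [PySem.Dict.contains_eq_isSome_get?] at hrc
            exact Option.not_isSome_iff_eq_none.mp (by simpa using hrc)
          refine ⟨PySem.Dict.nodup_keys_insert f c1 c2 hfn,
                  PySem.Dict.nodup_keys_insert r c2 c1 hrn, ?_⟩
          intro k v
          rw [PySem.Dict.get?_insert, PySem.Dict.get?_insert]
          split_ifs with h1 h2 h2
          · simp [h1, h2]
          · constructor
            · intro h; exact absurd (Option.some_injective _ h).symm h2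
            · intro h
              have h' := (hiff k v).mpr h
              rw [h1, hf1] at h'; simp at h'
          · constructor
            · intro h
              have h' := (hiff k v).mp h
              rw [h2, hr2] at h'; simp at h'
            · intro h; exact absurd (Option.some_injective _ h).symm h1
          · exact hiff k v

-- ===== VERDICT (by name: the statement is the Claim_ definition above) =====
theorem is_encoded_version_spec : Claim_equal_is_encoded_version := by
  intro original encoded _
  unfold Spec_is_encoded_version is_encoded_version is_encoded_version_alt
  split
  · rfl
  · exact pvMain _ _ _ ⟨PySem.Dict.nodup_keys_empty, PySem.Dict.nodup_keys_empty,
      by intro k v; simp [PySem.Dict.get?_empty]⟩
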